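-- pv_equiv track=rewrite | github.com/toniale/DSC20 | lab/lab06.py | difference_of_counts
-- ===== SOURCE A (Python) =====
-- def difference_of_counts(string, target0, target1):
--     """
--     Given a `string` and two target characters `target0` and `target1`,
--     return the difference between the count of `target0` and the count of
--     `target1` in the `string`.
--
--     >>> difference_of_counts("ABCcccCBA", "A", "c")
--     -1
--     >>> difference_of_counts("ABCcccCBA", "A", "B")
--     0
--     >>> difference_of_counts("ABCcccCBA", "A", "a")
--     2
--     """
--     if string == '':
--         return 0
--     if target0 == target1:
--         return 0
--     if target0 in string[0]:
--         return 1 + difference_of_counts(string[1:], target0, target1)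
--     if target1 in string[0]:
--         return difference_of_counts(string[1:], target0, target1) - 1
--     else:
--         return difference_of_counts(string[1:], target0, target1)
-- ===== SOURCE B (Python) =====
-- def difference_of_counts(string, target0, target1):
--     if target0 == target1:
--         return 0
--     total = 0
--     for ch in string:
--         if target0 in ch:
--             total += 1
--         elif target1 in ch:
--             total -= 1
--     return total
-- ===== Notes on version B (the rewrite author's own statement) =====
-- stated objective: simpler
-- what changed: Replaces the suffix-recursion (one Python call frame and one string slice per character) with a single iterative pass keeping a running total accumulator.
import Mathlib
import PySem

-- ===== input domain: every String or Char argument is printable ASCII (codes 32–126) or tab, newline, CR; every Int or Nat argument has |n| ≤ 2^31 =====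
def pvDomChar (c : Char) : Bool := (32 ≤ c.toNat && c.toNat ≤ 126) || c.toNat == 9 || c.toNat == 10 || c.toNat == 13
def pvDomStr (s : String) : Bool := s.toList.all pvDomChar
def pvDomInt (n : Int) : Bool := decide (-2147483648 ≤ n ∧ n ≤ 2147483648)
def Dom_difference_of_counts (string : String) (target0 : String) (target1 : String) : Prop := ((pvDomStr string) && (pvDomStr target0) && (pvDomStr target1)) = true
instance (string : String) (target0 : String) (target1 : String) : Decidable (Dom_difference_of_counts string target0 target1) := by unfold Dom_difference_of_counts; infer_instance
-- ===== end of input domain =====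

-- B replaces A's suffix-recursion by a single iterative pass with a running total (simpler decomposition, O(1) space).

-- Python `t in s` for a length-1 string s = "" + [c]: exact iff t is empty or t equals that one character.
def pyInChar (t : String) (c : Char) : Bool := t.toList == ([] : List Char) || t.toList == [c]

-- ===== PORT A =====
-- A's recursion on the suffix string[1:], transcribed over the character list.
def dcRecA (cs : List Char) (target0 : String) (target1 : String) : Int :=
  match cs with
  | [] => 0
  | c :: rest =>
    if target0 == target1 then 0
    else if pyInChar target0 c then 1 + dcRecA rest target0 target1
    else if pyInChar target1 c then dcRecA rest target0 target1 - 1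
    else dcRecA rest target0 target1

def difference_of_counts (string : String) (target0 : String) (target1 : String) : Int :=
  dcRecA string.toList target0 target1

-- ===== PORT B =====
def difference_of_counts_alt (string : String) (target0 : String) (target1 : String) : Int :=
  if target0 == target1 then 0
  else string.toList.foldl
    (fun total ch =>
      if pyInChar target0 ch then total + 1
      else if pyInChar target1 ch then total - 1
      else total) 0

-- ===== PRECONDITION & SPEC =====
def Spec_difference_of_counts (string : String) (target0 : String) (target1 : String) (out : Int) : Prop := out = difference_of_counts_alt string target0 target1
instance (string : String) (target0 : String) (target1 : String) (out : Int) : Decidable (Spec_difference_of_counts string target0 target1 out) := by unfold Spec_difference_of_counts; infer_instance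

-- ===== CLAIM (what is proved, stated in full; the proofs are below) =====
def Claim_equal_difference_of_counts : Prop := ∀ (string : String) (target0 : String) (target1 : String), Dom_difference_of_counts string target0 target1 → Spec_difference_of_counts string target0 target1 (difference_of_counts string target0 target1)

-- ===== LEMMAS AND PROOFS =====

theorem dcRecA_eq_targets (cs : List Char) (t0 t1 : String) (h : t0 == t1) :
    dcRecA cs t0 t1 = 0 := by
  cases cs with
  | nil => rfl
  | cons c rest => simp [dcRecA, h]

theorem dcRecA_eq_foldl (cs : List Char) (t0 t1 : String) (h : (t0 == t1) = false) (a : Int) :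
    cs.foldl (fun total ch =>
      if pyInChar t0 ch then total + 1
      else if pyInChar t1 ch then total - 1
      else total) a = a + dcRecA cs t0 t1 := by
  induction cs generalizing a with
  | nil => simp [dcRecA]
  | cons c rest ih =>
    simp only [List.foldl_cons, dcRecA, h]
    by_cases h0 : pyInChar t0 c
    · simp [h0, ih]; ring
    · by_cases h1 : pyInChar t1 c
      · simp [h0, h1, ih]; ring
      · simp [h0, h1, ih]

-- ===== VERDICT (by name: the statement is the Claim_ definition above) =====
theorem difference_of_counts_spec : Claim_equal_difference_of_counts := by
  intro s t0 t1 _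
  unfold Spec_difference_of_counts difference_of_counts difference_of_counts_alt
  by_cases h : (t0 == t1) = true
  · simp [h, dcRecA_eq_targets _ _ _ h]
  · simp only [Bool.not_eq_true] at h
    simp [h, dcRecA_eq_foldl s.toList t0 t1 h 0]
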